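-- pv_equiv track=rewrite | github.com/YasinBoloorchi/Persian-Poem-Search-Engine | read_query.py | doc_repeat_count
-- ===== SOURCE A (Python) =====
-- def doc_repeat_count(all_doc_id_for_words):
--     all_doc_id_set = list(set(all_doc_id_for_words))
--     doc_id_counts = {}
--
--     for this_doc_id in all_doc_id_set:
--         doc_id_counts[this_doc_id] = 0
--
--         for doc_id in all_doc_id_for_words:
--             if this_doc_id == doc_id:
--                 doc_id_counts[this_doc_id] += 1
--
--     second_top_results = []
--     for doc_id in doc_id_counts:
--         if doc_id_counts[doc_id] > 1:
--             second_top_results.append([doc_id_counts[doc_id], doc_id])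
--
--     second_top_results.sort(reverse=True)
--     second_top_results = [doc_id[1] for doc_id in second_top_results]
--     return second_top_results
-- ===== SOURCE B (Python) =====
-- def doc_repeat_count(all_doc_id_for_words):
--     # single sort + one linear run-collapsing pass instead of a rescan per distinct id
--     results = []
--     run = None  # (value, length) of the current run of equal ids
--     for v in sorted(all_doc_id_for_words):
--         if run is not None and run[0] == v:
--             run = (v, run[1] + 1)
--         else:
--             if run is not None and run[1] > 1:
--                 results.append([run[1], run[0]])
--             run = (v, 1)
--     if run is not None and run[1] > 1:
--         results.append([run[1], run[0]])
--     results.sort(reverse=True)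
--     return [p[1] for p in results]
-- ===== Notes on version B (the rewrite author's own statement) =====
-- stated objective: faster
-- what changed: Replaces A's per-distinct-id rescan of the whole list (building a count dict with a nested loop) by one sort of the ids followed by a single linear run-collapsing pass; the final descending sort of [count,id] pairs and projection are kept.
import Mathlib
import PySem

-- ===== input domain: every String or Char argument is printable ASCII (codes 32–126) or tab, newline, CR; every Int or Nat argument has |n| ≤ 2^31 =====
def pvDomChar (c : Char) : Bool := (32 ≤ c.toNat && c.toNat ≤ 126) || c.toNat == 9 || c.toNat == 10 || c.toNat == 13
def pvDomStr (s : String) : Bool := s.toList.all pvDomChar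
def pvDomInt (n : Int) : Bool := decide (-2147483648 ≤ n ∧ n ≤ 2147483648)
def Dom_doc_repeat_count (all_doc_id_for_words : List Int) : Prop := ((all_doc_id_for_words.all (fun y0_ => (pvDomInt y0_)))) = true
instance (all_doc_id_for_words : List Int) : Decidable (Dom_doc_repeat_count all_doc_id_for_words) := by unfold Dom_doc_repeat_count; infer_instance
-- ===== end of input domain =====

-- B replaces A's per-distinct-id rescan of the whole list by one sort plus a single
-- linear run-collapsing pass (faster); the final descending pair sort is kept.

-- ===== PORT A =====
def doc_repeat_count (all_doc_id_for_words : List Int) : List Int :=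
  let all_doc_id_set : List Int := PySem.Set.ofList all_doc_id_for_words
  let doc_id_counts : PySem.Dict Int Int :=
    all_doc_id_set.foldl
      (fun doc_id_counts this_doc_id =>
        let doc_id_counts := doc_id_counts.insert this_doc_id 0
        all_doc_id_for_words.foldl
          (fun doc_id_counts doc_id =>
            if this_doc_id == doc_id then doc_id_counts.modify this_doc_id 0 (· + 1)
            else doc_id_counts)
          doc_id_counts)
      PySem.Dict.empty
  let second_top_results : List (List Int) :=
    doc_id_counts.keys.foldl
      (fun acc doc_id =>
        if doc_id_counts.getD doc_id 0 > 1 then acc ++ [[doc_id_counts.getD doc_id 0, doc_id]]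
        else acc)
      []
  let second_top_results := PySem.List.sorted second_top_results (fun x => x) true
  second_top_results.map (fun doc_id => (PySem.List.pyGet? doc_id 1).getD 0)

-- ===== PORT B =====
-- flush the current run: append [length, value] if the run is longer than 1
def pvFlush (results : List (List Int)) (run : Option (Int × Int)) : List (List Int) :=
  match run with
  | none => results
  | some (v, c) => if c > 1 then results ++ [[c, v]] else results

def pvStep (st : List (List Int) × Option (Int × Int)) (v : Int) :
    List (List Int) × Option (Int × Int) :=
  match st.2 with
  | some (rv, rc) =>
      if rv = v then (st.1, some (rv, rc + 1))
      else (pvFlush st.1 (some (rv, rc)), some (v, 1))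
  | none => (st.1, some (v, 1))

def doc_repeat_count_alt (all_doc_id_for_words : List Int) : List Int :=
  let st := (PySem.List.sorted all_doc_id_for_words (fun x => x) false).foldl pvStep ([], none)
  let results := pvFlush st.1 st.2
  let results := PySem.List.sorted results (fun x => x) true
  results.map (fun p => (PySem.List.pyGet? p 1).getD 0)

-- ===== PRECONDITION & SPEC =====
def Spec_doc_repeat_count (all_doc_id_for_words : List Int) (out : List Int) : Prop := out = doc_repeat_count_alt all_doc_id_for_words
instance (all_doc_id_for_words : List Int) (out : List Int) : Decidable (Spec_doc_repeat_count all_doc_id_for_words out) := by unfold Spec_doc_repeat_count; infer_instance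

-- ===== CLAIM (what is proved, stated in full; the proofs are below) =====
def Claim_equal_doc_repeat_count : Prop := ∀ (all_doc_id_for_words : List Int), Dom_doc_repeat_count all_doc_id_for_words → Spec_doc_repeat_count all_doc_id_for_words (doc_repeat_count all_doc_id_for_words)

-- ===== LEMMAS AND PROOFS =====

-- canonical pair list: [count, id] for every distinct id occurring more than once
def pvRuns (l : List Int) : List (List Int) :=
  ((PySem.Set.ofList l).filter (fun k => decide (1 < ((l.count k : Int))))).map
    (fun k => [((l.count k : Int)), k])

-- ---- A-side ----

theorem pv_inner_getD (xs : List Int) (d : PySem.Dict Int Int) (t k : Int) :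
    (xs.foldl (fun d doc => if t == doc then d.modify t 0 (· + 1) else d) d).getD k 0
      = if k = t then d.getD k 0 + (xs.count t : Int) else d.getD k 0 := by
  induction xs generalizing d with
  | nil => simp
  | cons x xs ih =>
    simp only [List.foldl_cons]
    by_cases hx : t = x
    · subst hx
      simp only [BEq.rfl, if_true, ih, PySem.Dict.getD_modify, List.count_cons]
      split_ifs with h1
      · subst h1; simp; ring
      · simp
    · have : (t == x) = false := by simp [hx]
      simp only [this, Bool.false_eq_true, if_false, ih, List.count_cons]
      have hxt : (x == t) = false := by
        simp only [beq_eq_false_iff_ne]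
        omega
      simp [hxt]

theorem pv_inner_keys (xs : List Int) (d : PySem.Dict Int Int) (t : Int)
    (h : d.contains t = true) :
    (xs.foldl (fun d doc => if t == doc then d.modify t 0 (· + 1) else d) d).keys = d.keys := by
  induction xs generalizing d with
  | nil => simp
  | cons x xs ih =>
    simp only [List.foldl_cons]
    by_cases hx : t = x
    · subst hx
      rw [ih _ (by simp [PySem.Dict.contains_modify, h])]
      simp [PySem.Dict.keys_modify, PySem.Dict.keys_insert_of_contains _ _ h]
    · have hb : (t == x) = false := by simp [hx]
      simp only [hb, Bool.false_eq_true, if_false]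
      exact ih d h

theorem pv_outer_getD (s : List Int) (xs : List Int) (d : PySem.Dict Int Int) (k : Int) :
    ((s.foldl (fun d t =>
        xs.foldl (fun d doc => if t == doc then d.modify t 0 (· + 1) else d) (d.insert t 0)) d).getD k 0)
      = if k ∈ s then (xs.count k : Int) else d.getD k 0 := by
  induction s generalizing d with
  | nil => simp
  | cons t s ih =>
    simp only [List.foldl_cons, ih, pv_inner_getD, PySem.Dict.getD_insert, List.mem_cons]
    by_cases hk : k ∈ s
    · simp [hk]
    · by_cases ht : k = t
      · subst ht; simp [hk]
      · simp [hk, ht]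

theorem pv_outer_keys (s : List Int) (xs : List Int) (d : PySem.Dict Int Int) :
    ((s.foldl (fun d t =>
        xs.foldl (fun d doc => if t == doc then d.modify t 0 (· + 1) else d) (d.insert t 0)) d).keys)
      = PySem.Set.update d.keys s := by
  induction s generalizing d with
  | nil => simp [PySem.Set.update]
  | cons t s ih =>
    simp only [List.foldl_cons, ih, pv_inner_keys _ _ _ (PySem.Dict.contains_insert_self d t 0)]
    have hkeys : (d.insert t 0).keys = PySem.Set.add d.keys t := by
      by_cases h : d.contains t = true
      · rw [PySem.Dict.keys_insert_of_contains _ _ h]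
        simp [PySem.Set.add, PySem.Set.contains,
          (PySem.Dict.contains_iff_mem_keys d t).mp h]
      · rw [PySem.Dict.keys_insert_of_not_contains _ _ (by simpa using h)]
        have : t ∉ d.keys := fun hm => h ((PySem.Dict.contains_iff_mem_keys d t).mpr hm)
        simp [PySem.Set.add, PySem.Set.contains, this]
    rw [hkeys]
    simp [PySem.Set.update]

theorem pv_update_fresh (s : List Int) (acc : List Int) (hnd : s.Nodup)
    (hfr : ∀ x ∈ s, x ∉ acc) : PySem.Set.update acc s = acc ++ s := by
  induction s generalizing acc with
  | nil => simp [PySem.Set.update]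
  | cons t s ih =>
    have hadd : PySem.Set.add acc t = acc ++ [t] := by
      simp [PySem.Set.add, PySem.Set.contains, hfr t (by simp)]
    have : PySem.Set.update acc (t :: s) = PySem.Set.update (acc ++ [t]) s := by
      simp [PySem.Set.update, hadd]
    have hfr' : ∀ x ∈ s, x ∉ acc ++ [t] := by
      intro x hx
      simp only [List.mem_append, List.mem_singleton]
      rintro (h | h)
      · exact hfr x (by simp [hx]) h
      · subst h; exact (List.nodup_cons.mp hnd).1 hx
    rw [this, ih (acc ++ [t]) (List.Nodup.of_cons hnd) hfr']
    simp


theorem pv_a_shape (xs : List Int) :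
    doc_repeat_count xs
      = (PySem.List.sorted (pvRuns xs) (fun x => x) true).map
          (fun p => (PySem.List.pyGet? p 1).getD 0) := by
  unfold doc_repeat_count
  dsimp only
  set d : PySem.Dict Int Int := (PySem.Set.ofList xs).foldl
      (fun doc_id_counts this_doc_id =>
        xs.foldl
          (fun doc_id_counts doc_id =>
            if this_doc_id == doc_id then doc_id_counts.modify this_doc_id 0 (· + 1)
            else doc_id_counts)
          (doc_id_counts.insert this_doc_id 0))
      PySem.Dict.empty with hd
  have hkeys : d.keys = PySem.Set.ofList xs := by
    rw [hd, pv_outer_keys]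
    simp only [PySem.Dict.keys_empty]
    exact pv_update_fresh _ _ (PySem.Set.nodup_ofList xs) (by simp)
  have hgetD : ∀ k, d.getD k 0 = (xs.count k : Int) := by
    intro k
    rw [hd, pv_outer_getD]
    by_cases h : k ∈ PySem.Set.ofList xs
    · simp [h]
    · have hx : k ∉ xs := fun hm => h ((PySem.Set.mem_ofList xs k).mpr hm)
      simp [h, List.count_eq_zero.mpr hx]
  have hlist : (d.keys.foldl
      (fun acc doc_id =>
        if d.getD doc_id 0 > 1 then acc ++ [[d.getD doc_id 0, doc_id]] else acc) [])
      = pvRuns xs := by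
    have hfold := PySem.List.foldl_append_if
        (fun k => decide (1 < d.getD k 0)) (fun k => [d.getD k 0, k]) d.keys []
    simp only [decide_eq_true_eq] at hfold
    simp only [gt_iff_lt]
    rw [hfold, hkeys]
    unfold pvRuns
    have h1 : (fun k => decide (1 < d.getD k 0))
        = (fun k => decide (1 < ((xs.count k : Int)))) := by
      funext k; rw [hgetD]
    have h2 : (fun k => [d.getD k 0, k]) = (fun k => [((xs.count k : Int)), k]) := by
      funext k; rw [hgetD]
    rw [h1, h2]
    simp
  rw [hlist]

-- ---- B-side ----

theorem pv_update_cons (rest : List Int) (s : List Int) (x : Int) (h : x ∉ rest) :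
    List.foldl PySem.Set.add (x :: s) rest = x :: List.foldl PySem.Set.add s rest := by
  induction rest generalizing s with
  | nil => simp
  | cons r rest ih =>
    have hrx : r ≠ x := fun he => h (by simp [he])
    have hadd : PySem.Set.add (x :: s) r = x :: PySem.Set.add s r := by
      simp only [PySem.Set.add, PySem.Set.contains]
      have hc : (x :: s).contains r = s.contains r := by simp [hrx]
      simp only [hc]
      split_ifs <;> simp
    simp only [List.foldl_cons, hadd]
    exact ih _ (fun hm => h (by simp [hm]))

theorem pv_ofList_repl (n : Nat) (rv : Int) :
    List.foldl PySem.Set.add [rv] (List.replicate n rv) = [rv] := by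
  induction n with
  | zero => simp
  | succ m ih =>
    rw [List.replicate_succ, List.foldl_cons]
    have : PySem.Set.add [rv] rv = [rv] := by
      simp [PySem.Set.add, PySem.Set.contains]
    rw [this, ih]

theorem pv_ofList_split (n : Nat) (rv : Int) (rest : List Int) (h : rv ∉ rest) :
    PySem.Set.ofList (List.replicate (n + 1) rv ++ rest) = rv :: PySem.Set.ofList rest := by
  have h1 : PySem.Set.ofList (List.replicate (n + 1) rv ++ rest)
      = List.foldl PySem.Set.add [] (List.replicate (n + 1) rv ++ rest) := rfl
  rw [h1, List.foldl_append]
  have h2 : List.foldl PySem.Set.add [] (List.replicate (n + 1) rv) = [rv] := by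
    rw [List.replicate_succ, List.foldl_cons]
    have : PySem.Set.add [] rv = [rv] := by simp [PySem.Set.add, PySem.Set.contains]
    rw [this, pv_ofList_repl]
  rw [h2, pv_update_cons rest [] rv h]
  rfl

theorem pv_runs_split (n : Nat) (rv : Int) (rest : List Int) (h : rv ∉ rest) :
    pvRuns (List.replicate (n + 1) rv ++ rest)
      = (if (1:Int) < (n : Int) + 1 then [[(n : Int) + 1, rv]] else []) ++ pvRuns rest := by
  have hcnt : ∀ k, (((List.replicate (n + 1) rv ++ rest).count k : Int))
      = if k = rv then (n : Int) + 1 else ((rest.count k : Int)) := by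
    intro k
    by_cases hk : k = rv
    · subst hk
      simp [List.count_append, List.count_eq_zero.mpr h]
    · have h2 : (rv == k) = false := by
        simp only [beq_eq_false_iff_ne]
        omega
      simp [List.count_append, List.count_replicate, h2, hk]
  unfold pvRuns
  rw [pv_ofList_split n rv rest h, List.filter_cons]
  have hrest_ne : ∀ k ∈ PySem.Set.ofList rest, k ≠ rv := by
    intro k hk he
    exact h (by rw [← he]; exact (PySem.Set.mem_ofList rest k).mp hk)
  have hfc : (PySem.Set.ofList rest).filter
        (fun k => decide (1 < (((List.replicate (n + 1) rv ++ rest).count k : Int))))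
      = (PySem.Set.ofList rest).filter (fun k => decide (1 < ((rest.count k : Int)))) := by
    apply List.filter_congr
    intro k hk
    rw [hcnt k, if_neg (hrest_ne k hk)]
  have hcrv : (((List.replicate (n + 1) rv ++ rest).count rv : Int)) = (n : Int) + 1 := by
    rw [hcnt rv, if_pos rfl]
  have hmc : ∀ l' : List Int, (∀ k ∈ l', k ≠ rv) →
      l'.map (fun k => [(((List.replicate (n + 1) rv ++ rest).count k : Int)), k])
        = l'.map (fun k => [((rest.count k : Int)), k]) := by
    intro l' hl'
    apply List.map_congr_left
    intro k hk
    rw [hcnt k, if_neg (hl' k hk)]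
  rw [hfc, hcrv]
  have hmaps := hmc ((PySem.Set.ofList rest).filter (fun k => decide (1 < ((rest.count k : Int)))))
      (fun k hk => hrest_ne k (List.mem_of_mem_filter hk))
  by_cases h1 : (1:Int) < (n : Int) + 1
  · rw [if_pos (by simpa using h1), if_pos h1, List.map_cons, hcrv, hmaps]
    simp
  · rw [if_neg (by simpa using h1), if_neg h1, hmaps]
    simp

theorem pv_run_main (ys : List Int) (results : List (List Int)) (rv : Int) (n : Nat)
    (hs : ys.Pairwise (· ≤ ·)) (hle : ∀ y ∈ ys, rv ≤ y) :
    (pvFlush (ys.foldl pvStep (results, some (rv, (n : Int) + 1))).1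
             (ys.foldl pvStep (results, some (rv, (n : Int) + 1))).2)
      = results ++ pvRuns (List.replicate (n + 1) rv ++ ys) := by
  induction ys generalizing results rv n with
  | nil =>
    simp only [List.foldl_nil, List.append_nil]
    have hsplit := pv_runs_split n rv [] (by simp)
    rw [List.append_nil] at hsplit
    rw [hsplit]
    have hruns0 : pvRuns [] = [] := rfl
    rw [hruns0]
    simp only [pvFlush, List.append_nil, gt_iff_lt]
    split_ifs <;> simp
  | cons v tl ih =>
    have htl : tl.Pairwise (· ≤ ·) := (List.pairwise_cons.mp hs).2
    have hvle : ∀ y ∈ tl, v ≤ y := (List.pairwise_cons.mp hs).1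
    simp only [List.foldl_cons]
    by_cases hv : rv = v
    · subst hv
      have hstep : pvStep (results, some (rv, (n : Int) + 1)) rv
          = (results, some (rv, ((n + 1 : Nat) : Int) + 1)) := by
        simp [pvStep]
      rw [hstep, ih results rv (n + 1) htl hvle]
      have hrep : List.replicate (n + 1) rv ++ rv :: tl = List.replicate (n + 1 + 1) rv ++ tl := by
        rw [List.append_cons, ← List.replicate_succ']
      rw [hrep]
    · have hstep : pvStep (results, some (rv, (n : Int) + 1)) v
          = (pvFlush results (some (rv, (n : Int) + 1)), some (v, ((0 : Nat) : Int) + 1)) := by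
        simp [pvStep, hv]
      rw [hstep, ih _ v 0 htl hvle]
      have hnotmem : rv ∉ v :: tl := by
        have hlt : rv < v := lt_of_le_of_ne (hle v (by simp)) hv
        intro hm
        rcases List.mem_cons.mp hm with h1 | h1
        · exact hv h1
        · exact absurd (hvle rv h1) (not_le.mpr hlt)
      have hrep1 : List.replicate (0 + 1) v ++ tl = v :: tl := by simp
      rw [hrep1, pv_runs_split n rv (v :: tl) hnotmem]
      simp only [pvFlush, gt_iff_lt]
      split_ifs <;> simp

theorem pv_b_shape (xs : List Int) :
    doc_repeat_count_alt xs
      = (PySem.List.sorted (pvRuns (PySem.List.sorted xs (fun x => x) false)) (fun x => x) true).map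
          (fun p => (PySem.List.pyGet? p 1).getD 0) := by
  unfold doc_repeat_count_alt
  dsimp only
  rcases hys : PySem.List.sorted xs (fun x => x) false with _ | ⟨v, tl⟩
  · rfl
  · have hpw : (v :: tl).Pairwise (· ≤ ·) := by
      have h := PySem.List.sorted_pairwise xs (fun x => x)
      rw [hys] at h
      exact h
    have htl : tl.Pairwise (· ≤ ·) := (List.pairwise_cons.mp hpw).2
    have hvle : ∀ y ∈ tl, v ≤ y := (List.pairwise_cons.mp hpw).1
    simp only [List.foldl_cons]
    have hstep : pvStep (([] : List (List Int)), none) v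
        = ([], some (v, ((0 : Nat) : Int) + 1)) := by
      simp [pvStep]
    rw [hstep, pv_run_main tl [] v 0 htl hvle]
    have hrep1 : List.replicate (0 + 1) v ++ tl = v :: tl := by simp
    rw [hrep1, List.nil_append]

-- ---- assembling ----

theorem pv_runs_nodup (l : List Int) : (pvRuns l).Nodup := by
  unfold pvRuns
  refine List.Nodup.map ?_ (List.Nodup.filter _ (PySem.Set.nodup_ofList l))
  intro a b hab
  simp only [List.cons.injEq, and_true] at hab
  exact hab.2

theorem pv_runs_perm (xs : List Int) :
    (pvRuns (PySem.List.sorted xs (fun x => x) false)).Perm (pvRuns xs) := by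
  set ys := PySem.List.sorted xs (fun x => x) false with hys
  have hperm : ys.Perm xs := PySem.List.sorted_perm xs (fun x => x) false
  have hcount : ∀ k, ys.count k = xs.count k := fun k => hperm.count_eq k
  have hsets : (PySem.Set.ofList ys).Perm (PySem.Set.ofList xs) := by
    rw [List.perm_ext_iff_of_nodup (PySem.Set.nodup_ofList ys) (PySem.Set.nodup_ofList xs)]
    intro a
    rw [PySem.Set.mem_ofList, PySem.Set.mem_ofList, hperm.mem_iff]
  unfold pvRuns
  rw [show (fun k => decide (1 < ((ys.count k : Int)))) = (fun k => decide (1 < ((xs.count k : Int)))) from by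
        funext k; rw [hcount]]
  rw [show (fun k => [((ys.count k : Int)), k]) = (fun k => [((xs.count k : Int)), k]) from by
        funext k; rw [hcount]]
  exact (hsets.filter _).map _

-- the two `sorted` calls of the ports use core's `LT (List Int)`; this bridges to the
-- (definitionally equal) order instance Mathlib's sorting lemmas are stated for
theorem pv_sorted_swap {α κ : Type} (i1 i2 : LT κ) (d1 : ∀ a b : κ, Decidable (@LT.lt κ i1 a b))
    (d2 : ∀ a b : κ, Decidable (@LT.lt κ i2 a b)) (h : i1 = i2)
    (l : List α) (key : α → κ) (rev : Bool) :
    @PySem.List.sorted α κ i1 d1 l key rev = @PySem.List.sorted α κ i2 d2 l key rev := by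
  subst h
  congr 1

theorem pv_sorted_eq (xs : List Int) :
    PySem.List.sorted (pvRuns xs) (fun x => x) true
      = PySem.List.sorted (pvRuns (PySem.List.sorted xs (fun x => x) false)) (fun x => x) true := by
  have h1 : PySem.List.sorted (pvRuns xs) (fun x => x) true
      = @PySem.List.sorted (List ℤ) (List ℤ) _
          (@LinearOrder.toDecidableLT _ (inferInstance : LinearOrder (List ℤ)))
          (pvRuns xs) (fun x => x) true :=
    pv_sorted_swap _ _ _ _ rfl _ _ _
  have h2 : PySem.List.sorted (pvRuns (PySem.List.sorted xs (fun x => x) false)) (fun x => x) true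
      = @PySem.List.sorted (List ℤ) (List ℤ) _
          (@LinearOrder.toDecidableLT _ (inferInstance : LinearOrder (List ℤ)))
          (pvRuns (PySem.List.sorted xs (fun x => x) false)) (fun x => x) true :=
    pv_sorted_swap _ _ _ _ rfl _ _ _
  rw [h1, h2]
  set ys := PySem.List.sorted xs (fun x => x) false with hys
  apply PySem.List.sorted_rev_eq_of_perm_of_pairwise_gt
  · exact List.Perm.trans (@PySem.List.sorted_perm (List ℤ) (List ℤ) _
        (@LinearOrder.toDecidableLT _ (inferInstance : LinearOrder (List ℤ)))
        (pvRuns ys) (fun x => x) true) (pv_runs_perm xs)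
  · have hp1 := @PySem.List.sorted_pairwise_rev (List ℤ) (List ℤ)
        (inferInstance : LinearOrder (List ℤ)) (pvRuns ys) (fun x => x)
    have hp2 := (List.Perm.symm (@PySem.List.sorted_perm (List ℤ) (List ℤ) _
        (@LinearOrder.toDecidableLT _ (inferInstance : LinearOrder (List ℤ)))
        (pvRuns ys) (fun x => x) true)).nodup (pv_runs_nodup ys)
    have hp3 := hp1.and hp2
    refine hp3.imp ?_
    intro a b hab
    exact lt_of_le_of_ne hab.1 (fun he => hab.2 he.symm)

-- ===== VERDICT (by name: the statement is the Claim_ definition above) =====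
theorem doc_repeat_count_spec : Claim_equal_doc_repeat_count := by
  intro xs _
  unfold Spec_doc_repeat_count
  rw [pv_a_shape, pv_b_shape, pv_sorted_eq]
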